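-- pv_equiv track=rewrite | github.com/jluttine/junction-tree | bp.py | identify_cliques
-- ===== SOURCE A (Python) =====
-- def identify_cliques(induced_clusters):
--     """
--     Input:
--     ------
--
--     A list of clusters generated when finding graph triangulation
--
--     Output:
--     -------
--
--     A list of maximal cliques where each maximal clique is a list of
--         key indices it contains:
--
--     [clique1, ..., cliqueK]
--
--     That is, if there are N keys, each clique contains some subset of
--         numbers from {0, ..., N-1} as a tuple/list.
--
--     Notes
--     -----
--     A clique may contain multiple factors.
--
--     See:
--     http://www.stat.washington.edu/courses/stat535/fall11/Handouts/l5-decomposable.pdf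
--
--
--     """
--
--     # only retain clusters that are not a subset of another cluster
--     sets=[frozenset(c) for c in induced_clusters]
--     cliques=[]
--     for s1 in sets:
--         if any(s1 < s2 for s2 in sets):
--             continue
--         else:
--             cliques.append(list(s1))
--
--
--     return cliques
-- ===== SOURCE B (Python) =====
-- def identify_cliques(induced_clusters):
--     # Descending-size sweep with an accumulator of maximal sets seen so far:
--     # a cluster survives iff it is not a proper subset of any already-kept
--     # (necessarily larger) maximal set; output restores the input order.
--     sets = [frozenset(c) for c in induced_clusters]
--     n = len(sets)
--     keep = [False] * n
--     kept = []  # maximal sets found so far, sizes non-increasing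
--     max_size = max((len(s) for s in sets), default=0)
--     for size in range(max_size, -1, -1):
--         for i in range(n):
--             s = sets[i]
--             if len(s) == size and not any(len(s) < len(k) and s <= k for k in kept):
--                 keep[i] = True
--                 kept.append(s)
--     return [list(sets[i]) for i in range(n) if keep[i]]
-- ===== Notes on version B (the rewrite author's own statement) =====
-- stated objective: alternative
-- what changed: A rescans all clusters for a proper superset of each cluster (all-pairs frozenset '<' tests); B sweeps the size classes in descending order while maintaining an accumulator of the maximal sets found so far, tests each cluster only against that accumulator, and restores the input order via a keep-flag array.
import Mathlib
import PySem

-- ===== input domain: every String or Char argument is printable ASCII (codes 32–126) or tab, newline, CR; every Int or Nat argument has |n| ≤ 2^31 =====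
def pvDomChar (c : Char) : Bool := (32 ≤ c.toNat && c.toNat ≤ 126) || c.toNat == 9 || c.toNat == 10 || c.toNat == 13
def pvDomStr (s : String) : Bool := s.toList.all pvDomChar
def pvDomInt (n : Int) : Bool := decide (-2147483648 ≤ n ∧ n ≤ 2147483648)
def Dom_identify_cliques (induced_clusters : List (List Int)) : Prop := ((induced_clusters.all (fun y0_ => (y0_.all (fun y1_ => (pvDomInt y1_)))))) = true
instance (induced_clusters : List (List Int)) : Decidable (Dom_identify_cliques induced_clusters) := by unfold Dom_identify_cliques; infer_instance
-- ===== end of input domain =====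

-- B replaces A's all-pairs proper-subset scan by a descending-size sweep that keeps an
-- accumulator of the maximal sets found so far (objective: alternative decomposition).
-- Each port carries its own transliteration of `list(frozenset(c))` (CPython's int-keyed
-- hash table, which both Pythons rely on for the element order of the output lists).

-- ===== PORT A =====
-- A's `list(frozenset(c))`: exact hand port of CPython's setobject.c for int keys
-- (open addressing, LINEAR_PROBES = 9, perturb probing, growth x4 past 3/5 fill;
-- hash(x) = x except hash(-1) = -2, reduced mod 2^64).  A duplicate insert leaves the
-- CPython table unchanged, so the keys are deduplicated first; for distinct keys
-- set_add_entry takes the first free slot of the probe sequence, as probeSlot does.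
def pyHashU (x : Int) : Nat := (((if x = -1 then -2 else x)) % (2:Int) ^ 64).toNat

-- first free slot among t[i], …, t[i+k] (CPython's linear-probe window), if any
def linProbe (t : List (Option Int)) : Nat → Nat → Option Nat
  | i, 0 => if i < t.length ∧ t.getD i (some 0) = none then some i else none
  | i, k + 1 => if i < t.length ∧ t.getD i (some 0) = none then some i else linProbe t (i + 1) k

-- CPython probe sequence: linear window, then i := (i*5 + 1 + (perturb >>= 5)) & mask.
-- The fuel is never exhausted in reality (i := 5*i+1 mod 2^k alone is full-period).
def probeSlot (t : List (Option Int)) : Nat → Nat → Nat → Option Nat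
  | _, _, 0 => none
  | i, perturb, fuel + 1 =>
    match linProbe t i (if i + 9 ≤ t.length - 1 then 9 else 0) with
    | some j => some j
    | none => probeSlot t ((i * 5 + 1 + perturb / 32) % t.length) (perturb / 32) fuel

def firstNone : List (Option Int) → Option Nat
  | [] => none
  | none :: _ => some 0
  | some _ :: t => (firstNone t).map (· + 1)

-- insert one (fresh) key into the table; the fallbacks are unreachable in reality
def tableInsert (t : List (Option Int)) (x : Int) : List (Option Int) :=
  match probeSlot t (pyHashU x % t.length) (pyHashU x) (t.length + 20) with
  | some j => t.set j (some x)
  | none =>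
    match firstNone t with
    | some j => t.set j (some x)
    | none => t ++ [some x]

-- newsize = 8; while newsize <= minused: newsize <<= 1
def growSize (minused : Nat) : Nat → Nat → Nat
  | s, 0 => s
  | s, f + 1 => if minused < s then s else growSize minused (s * 2) f

-- add one key, then resize (rebuild in table order) when fill*5 >= mask*3
def buildStep (st : List (Option Int) × Nat) (x : Int) : List (Option Int) × Nat :=
  if (st.2 + 1) * 5 < ((tableInsert st.1 x).length - 1) * 3 then (tableInsert st.1 x, st.2 + 1)
  else
    (((tableInsert st.1 x).filterMap id).foldl tableInsert
        (List.replicate (growSize (if 50000 < st.2 + 1 then (st.2 + 1) * 2 else (st.2 + 1) * 4) 8 64) none),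
      st.2 + 1)

def pySet (l : List Int) : List Int :=
  ((PySem.List.dedup l).foldl buildStep (List.replicate 8 none, 0)).1.filterMap id

-- `s1 < s2` on frozensets: proper subset (element lists are duplicate-free)
def isProperSubset (a b : List Int) : Bool :=
  a.all (fun x => b.contains x) && !(b.all (fun x => a.contains x))

def identify_cliques (induced_clusters : List (List Int)) : List (List Int) :=
  (induced_clusters.map pySet).foldl
    (fun cliques s1 =>
      if (induced_clusters.map pySet).any (fun s2 => isProperSubset s1 s2) then cliques
      else cliques ++ [s1])
    []

-- ===== PORT B =====
-- B's own transliteration of `list(frozenset(c))` (the same CPython table semantics,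
-- written independently: combined window scan, shift operators, explicit recursions).
abbrev Tbl := List (Option Int)

def hB (z : Int) : Nat := ((if z == -1 then (-2 : Int) else z) % 18446744073709551616).toNat

-- first free slot among the next n slots starting at j
def winB (a : Tbl) : Nat → Nat → Option Nat
  | _, 0 => none
  | j, n + 1 =>
    if (a.getD j (some 1)).isNone && decide (j < a.length) then some j else winB a (j + 1) n

-- probe sequence: a window of 10 slots (1 near the table end), then rehash the index
def hopB (a : Tbl) : Nat → Nat → Nat → Option Nat
  | 0, _, _ => none
  | f + 1, j, p =>
    match winB a j (if j + 10 ≤ a.length then 10 else 1) with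
    | some r => some r
    | none => hopB a f ((5 * j + (p >>> 5) + 1) % a.length) (p >>> 5)

def putB (a : Tbl) (z : Int) : Tbl :=
  match hopB a (a.length + 20) (hB z % a.length) (hB z) with
  | some r => a.set r (some z)
  | none =>
    match a.findIdx? (fun o => o.isNone) with
    | some r => a.set r (some z)
    | none => a.concat (some z)

-- smallest power-of-two table size 8·2^k exceeding `need`
def sizeB (need : Nat) : Nat → Nat → Nat
  | 0, s => s
  | f + 1, s => if s ≤ need then sizeB need f (2 * s) else s

-- re-insert all occupied slots into a fresh table
def rehashB : List Int → Tbl → Tbl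
  | [], a => a
  | y :: ys, a => rehashB ys (putB a y)

def stepB (acc : Tbl × Nat) (z : Int) : Tbl × Nat :=
  if 3 * ((putB acc.1 z).length - 1) ≤ 5 * (acc.2 + 1) then
    (rehashB ((putB acc.1 z).filterMap (fun o => o))
        (List.replicate
          (sizeB (if acc.2 + 1 ≤ 50000 then 4 * (acc.2 + 1) else 2 * (acc.2 + 1)) 64 8) none),
      acc.2 + 1)
  else (putB acc.1 z, acc.2 + 1)

def packB : List Int → Tbl × Nat → Tbl × Nat
  | [], acc => acc
  | y :: ys, acc => packB ys (stepB acc y)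

def buildB (l : List Int) : List Int :=
  (packB (PySem.Set.ofList l) (List.replicate 8 none, 0)).1.filterMap (fun o => o)

-- `s <= k` on frozensets: subset
def isSubset (a b : List Int) : Bool := a.all (fun x => b.contains x)

-- body of `for i in range(n)`: test cluster i of the current size class against the
-- maximal sets collected so far; state = (keep flags, kept maximal sets)
def sweepBody (sets : List (List Int)) (size : Int)
    (st : List Bool × List (List Int)) (i : Int) : List Bool × List (List Int) :=
  if (decide (((PySem.List.pyGetD sets i []).length : Int) = size) &&
      !(st.2.any (fun k =>
          decide (((PySem.List.pyGetD sets i []).length : Int) < (k.length : Int)) &&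
          isSubset (PySem.List.pyGetD sets i []) k))) = true
  then (PySem.List.pySetD st.1 i true, st.2 ++ [PySem.List.pyGetD sets i []])
  else st

def identify_cliques_alt (induced_clusters : List (List Int)) : List (List Int) :=
  (PySem.List.pyRange 0 ((induced_clusters.map buildB).length : Int) 1).foldl
    (fun out i =>
      if PySem.List.pyGetD
          ((PySem.List.pyRange
              (PySem.List.maxD ((induced_clusters.map buildB).map (fun s => ((s.length : Int))))
                (fun x => x) 0) (-1) (-1)).foldl
            (fun st size =>
              (PySem.List.pyRange 0 ((induced_clusters.map buildB).length : Int) 1).foldl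
                (sweepBody (induced_clusters.map buildB) size) st)
            (List.replicate (induced_clusters.map buildB).length false, [])).1
          i false = true
      then out ++ [PySem.List.pyGetD (induced_clusters.map buildB) i []] else out)
    []

-- ===== PRECONDITION & SPEC =====
def Spec_identify_cliques (induced_clusters : List (List Int)) (out : List (List Int)) : Prop := out = identify_cliques_alt induced_clusters
instance (induced_clusters : List (List Int)) (out : List (List Int)) : Decidable (Spec_identify_cliques induced_clusters out) := by unfold Spec_identify_cliques; infer_instance

-- ===== CLAIM (what is proved, stated in full; the proofs are below) =====
def Claim_equal_identify_cliques : Prop := ∀ (induced_clusters : List (List Int)), Dom_identify_cliques induced_clusters → Spec_identify_cliques induced_clusters (identify_cliques induced_clusters)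

-- ===== LEMMAS AND PROOFS =====

-- ---- B's table model agrees with A's ----

theorem hB_eq (z : Int) : hB z = pyHashU z := by
  unfold hB pyHashU
  norm_num [beq_iff_eq]

theorem condB_eq (t : List (Option Int)) (j : Nat) :
    ((t.getD j (some 1)).isNone && decide (j < t.length))
      = decide (j < t.length ∧ t.getD j (some 0) = none) := by
  by_cases hj : j < t.length
  · have h01 : t.getD j (some 1) = t.getD j (some 0) := by
      rw [List.getD_eq_getElem?_getD, List.getD_eq_getElem?_getD,
        List.getElem?_eq_getElem hj]
      rfl
    rw [h01]
    cases t.getD j (some 0) <;> simp [hj]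
  · have h1 : t.getD j (some 1) = some 1 := by
      rw [List.getD_eq_getElem?_getD]
      rw [List.getElem?_eq_none (by omega)]
      rfl
    rw [h1]
    simp [hj]

theorem winB_eq (t : List (Option Int)) (k : Nat) :
    ∀ j, winB t j (k + 1) = linProbe t j k := by
  induction k with
  | zero =>
    intro j
    unfold winB linProbe
    rw [condB_eq]
    by_cases hc : j < t.length ∧ t.getD j (some 0) = none
    · have hgj : t[j]'hc.1 = none := by
        have h2 := hc.2
        rw [List.getD_eq_getElem?_getD, List.getElem?_eq_getElem hc.1] at h2
        simpa using h2
      simp [hc, hgj]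
    · rw [if_neg (by simpa using hc), if_neg (by exact hc)]
      simp [winB]
  | succ k ih =>
    intro j
    unfold winB linProbe
    rw [condB_eq]
    by_cases hc : j < t.length ∧ t.getD j (some 0) = none
    · have hgj : t[j]'hc.1 = none := by
        have h2 := hc.2
        rw [List.getD_eq_getElem?_getD, List.getElem?_eq_getElem hc.1] at h2
        simpa using h2
      simp [hc, hgj]
    · rw [if_neg (by simpa using hc), if_neg (by exact hc)]
      exact ih (j + 1)

theorem hopB_eq (t : List (Option Int)) :
    ∀ (f j p : Nat), hopB t f j p = probeSlot t j p f := by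
  intro f
  induction f with
  | zero => intro j p; rfl
  | succ f ih =>
    intro j p
    unfold hopB probeSlot
    have hwin : (if j + 10 ≤ t.length then 10 else 1) =
        (if j + 9 ≤ t.length - 1 then 9 else 0) + 1 := by
      split_ifs <;> omega
    rw [hwin, winB_eq]
    have hsh : p >>> 5 = p / 32 := by
      rw [Nat.shiftRight_eq_div_pow]
    have hidx : 5 * j + (p >>> 5) + 1 = j * 5 + 1 + p / 32 := by
      rw [hsh]
      omega
    rw [hidx, hsh, ih]

theorem findIdx?_eq_firstNone (t : List (Option Int)) :
    t.findIdx? (fun o => o.isNone) = firstNone t := by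
  induction t with
  | nil => rfl
  | cons hd tl ih =>
    cases hd with
    | none => simp [firstNone, List.findIdx?_cons]
    | some v => simp [firstNone, List.findIdx?_cons, ih]

theorem putB_eq (t : List (Option Int)) (z : Int) : putB t z = tableInsert t z := by
  unfold putB tableInsert
  rw [hB_eq, hopB_eq, findIdx?_eq_firstNone, List.concat_eq_append]

theorem sizeB_eq (need : Nat) : ∀ (f s : Nat), sizeB need f s = growSize need s f := by
  intro f
  induction f with
  | zero => intro s; rfl
  | succ f ih =>
    intro s
    unfold sizeB growSize
    rcases Nat.lt_or_ge need s with h | h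
    · rw [if_neg (by omega), if_pos h]
    · rw [if_pos (by omega), if_neg (by omega), ih, Nat.mul_comm]

theorem rehashB_eq : ∀ (xs : List Int) (t : List (Option Int)),
    rehashB xs t = xs.foldl tableInsert t := by
  intro xs
  induction xs with
  | nil => intro t; rfl
  | cons y ys ih => intro t; unfold rehashB; rw [ih, putB_eq]; rfl

theorem stepB_eq (acc : List (Option Int) × Nat) (z : Int) :
    stepB acc z = buildStep acc z := by
  unfold stepB buildStep
  rw [putB_eq, rehashB_eq, sizeB_eq]
  have hneed : (if acc.2 + 1 ≤ 50000 then 4 * (acc.2 + 1) else 2 * (acc.2 + 1)) =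
      (if 50000 < acc.2 + 1 then (acc.2 + 1) * 2 else (acc.2 + 1) * 4) := by
    split_ifs <;> omega
  rw [hneed]
  have hid : ((tableInsert acc.1 z).filterMap (fun o => o)) =
      ((tableInsert acc.1 z).filterMap id) := rfl
  rw [hid]
  by_cases hc : (acc.2 + 1) * 5 < ((tableInsert acc.1 z).length - 1) * 3
  · rw [if_neg (by omega :
        ¬ 3 * ((tableInsert acc.1 z).length - 1) ≤ 5 * (acc.2 + 1)), if_pos hc]
  · rw [if_pos (by omega :
        3 * ((tableInsert acc.1 z).length - 1) ≤ 5 * (acc.2 + 1)), if_neg hc]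

theorem packB_eq : ∀ (xs : List Int) (acc : List (Option Int) × Nat),
    packB xs acc = xs.foldl buildStep acc := by
  intro xs
  induction xs with
  | nil => intro acc; rfl
  | cons y ys ih => intro acc; unfold packB; rw [ih, stepB_eq]; rfl

theorem buildB_eq : buildB = pySet := by
  funext l
  unfold buildB pySet
  rw [packB_eq, PySem.List.dedup_eq_ofList]
  rfl

-- ---- the common characterisation: keep the clusters with no proper superset ----

-- `s` is a proper subset of some cluster: the predicate both programs decide
def BadIn (sets : List (List Int)) (s : List Int) : Prop :=
  ∃ t ∈ sets, (∀ x ∈ s, x ∈ t) ∧ s.length < t.length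

-- Bool form of BadIn (kept separate: no Decidable instances may be declared)
def badB (sets : List (List Int)) (s : List Int) : Bool :=
  sets.any (fun t => (s.all (fun x => t.contains x)) && decide (s.length < t.length))

theorem badB_iff {sets : List (List Int)} {s : List Int} :
    badB sets s = true ↔ BadIn sets s := by
  unfold badB BadIn
  simp [List.any_eq_true, List.all_eq_true]

theorem badB_true {sets : List (List Int)} {s : List Int} (h : BadIn sets s) :
    badB sets s = true := badB_iff.mpr h

theorem badB_false {sets : List (List Int)} {s : List Int} (h : ¬ BadIn sets s) :
    badB sets s = false :=
  Bool.eq_false_iff.mpr (fun hc => h (badB_iff.mp hc))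

theorem linProbe_some {t : List (Option Int)} {i k j : Nat}
    (h : linProbe t i k = some j) : j < t.length ∧ t.getD j (some 0) = none := by
  induction k generalizing i with
  | zero =>
    unfold linProbe at h
    split at h
    · cases h; exact ‹_›
    · cases h
  | succ k ih =>
    unfold linProbe at h
    split at h
    · cases h; exact ‹_›
    · exact ih h

theorem probeSlot_some {t : List (Option Int)} {i p f j : Nat}
    (h : probeSlot t i p f = some j) : j < t.length ∧ t.getD j (some 0) = none := by
  induction f generalizing i p with
  | zero => cases h
  | succ f ih =>
    unfold probeSlot at h
    split at h
    · rename_i heq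
      cases h
      exact linProbe_some heq
    · exact ih h

theorem firstNone_some {t : List (Option Int)} {j : Nat}
    (h : firstNone t = some j) : j < t.length ∧ t.getD j (some 0) = none := by
  induction t generalizing j with
  | nil => cases h
  | cons hd tl ih =>
    cases hd with
    | none => cases h; simp [List.getD]
    | some a =>
      unfold firstNone at h
      cases hj : firstNone tl with
      | none => rw [hj] at h; cases h
      | some j' =>
        rw [hj] at h
        cases h
        have := ih hj
        exact ⟨by simpa using this.1, by simpa [List.getD_cons_succ] using this.2⟩

theorem filterMap_set_none {t : List (Option Int)} {j : Nat} {x : Int}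
    (hj : j < t.length) (hn : t.getD j (some 0) = none) :
    ((t.set j (some x)).filterMap id).Perm (x :: t.filterMap id) := by
  induction t generalizing j with
  | nil => simp at hj
  | cons hd tl ih =>
    cases j with
    | zero =>
      rw [List.getD_cons_zero] at hn
      subst hn
      simp
    | succ j =>
      simp only [List.set_cons_succ]
      cases hd with
      | none =>
        simpa using ih (by simpa using hj) (by simpa using hn)
      | some a =>
        have h' := ih (by simpa using hj) (by simpa using hn)
        simp only [List.filterMap_cons, id]
        exact (h'.cons a).trans (List.Perm.swap x a _)

theorem contents_tableInsert (t : List (Option Int)) (x : Int) :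
    ((tableInsert t x).filterMap id).Perm (x :: t.filterMap id) := by
  unfold tableInsert
  cases hp : probeSlot t (pyHashU x % t.length) (pyHashU x) (t.length + 20) with
  | some j =>
    have h := probeSlot_some hp
    exact filterMap_set_none h.1 h.2
  | none =>
    cases hf : firstNone t with
    | some j =>
      have h := firstNone_some hf
      exact filterMap_set_none h.1 h.2
    | none =>
      rw [List.filterMap_append]
      simp

theorem contents_foldl_tableInsert (xs : List Int) (t : List (Option Int)) :
    ((xs.foldl tableInsert t).filterMap id).Perm (xs ++ t.filterMap id) := by
  induction xs generalizing t with
  | nil => simp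
  | cons a xs ih =>
    simp only [List.foldl_cons, List.cons_append]
    refine (ih (tableInsert t a)).trans ?_
    refine (((contents_tableInsert t a).append_left xs).trans ?_)
    exact List.perm_middle

theorem contents_buildStep (st : List (Option Int) × Nat) (x : Int) :
    ((buildStep st x).1.filterMap id).Perm (x :: st.1.filterMap id) := by
  unfold buildStep
  split
  · exact contents_tableInsert st.1 x
  · simp only
    refine (contents_foldl_tableInsert _ _).trans ?_
    have hrep : (List.replicate
        (growSize (if 50000 < st.2 + 1 then (st.2 + 1) * 2 else (st.2 + 1) * 4) 8 64)
        (none : Option Int)).filterMap id = [] := by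
      simp
    rw [hrep, List.append_nil]
    exact contents_tableInsert st.1 x

theorem contents_foldl_buildStep (xs : List Int) (st : List (Option Int) × Nat) :
    (((xs.foldl buildStep st).1).filterMap id).Perm (xs ++ st.1.filterMap id) := by
  induction xs generalizing st with
  | nil => simp
  | cons a xs ih =>
    simp only [List.foldl_cons, List.cons_append]
    refine (ih (buildStep st a)).trans ?_
    refine (((contents_buildStep st a).append_left xs).trans ?_)
    exact List.perm_middle

theorem pySet_perm (l : List Int) : (pySet l).Perm (PySem.List.dedup l) := by
  unfold pySet
  refine (contents_foldl_buildStep (PySem.List.dedup l) _).trans ?_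
  simp

theorem pySet_nodup (l : List Int) : (pySet l).Nodup :=
  (pySet_perm l).symm.nodup (PySem.List.nodup_dedup l)

-- ---- A's test equals BadIn (on duplicate-free element lists) ----

theorem subset_length_le {s t : List Int} (hs : s.Nodup) (hsub : s ⊆ t) :
    s.length ≤ t.length := by
  calc s.length = s.toFinset.card := (List.toFinset_card_of_nodup hs).symm
    _ ≤ t.toFinset.card := Finset.card_le_card (by
        intro x hx
        simp only [List.mem_toFinset] at *
        exact hsub hx)
    _ ≤ t.length := List.toFinset_card_le t

theorem subset_back_of_length {s t : List Int} (hs : s.Nodup) (ht : t.Nodup)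
    (hsub : s ⊆ t) (hlen : t.length ≤ s.length) : t ⊆ s := by
  have hcard : t.toFinset.card ≤ s.toFinset.card := by
    rw [List.toFinset_card_of_nodup hs, List.toFinset_card_of_nodup ht]
    omega
  have hfs : s.toFinset ⊆ t.toFinset := by
    intro x hx
    simp only [List.mem_toFinset] at *
    exact hsub hx
  have heq : s.toFinset = t.toFinset := Finset.eq_of_subset_of_card_le hfs hcard
  intro x hx
  have hx' : x ∈ s.toFinset := by rw [heq]; simpa using hx
  simpa using hx'

theorem isProperSubset_iff {s t : List Int} (hs : s.Nodup) (ht : t.Nodup) :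
    isProperSubset s t = true ↔ ((∀ x ∈ s, x ∈ t) ∧ s.length < t.length) := by
  unfold isProperSubset
  rw [Bool.and_eq_true, Bool.not_eq_true']
  constructor
  · rintro ⟨h1, h2⟩
    have hsub : s ⊆ t := by
      intro x hx
      have := List.all_eq_true.mp h1 x hx
      simpa using this
    refine ⟨fun x hx => hsub hx, ?_⟩
    have hle := subset_length_le hs hsub
    rcases eq_or_lt_of_le hle with he | hl
    · exfalso
      have hback := subset_back_of_length hs ht hsub (le_of_eq he.symm)
      have hall : t.all (fun x => s.contains x) = true := by
        rw [List.all_eq_true]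
        intro x hx
        simpa using hback hx
      rw [hall] at h2
      cases h2
    · exact hl
  · rintro ⟨hsub, hlt⟩
    constructor
    · rw [List.all_eq_true]
      intro x hx
      simpa using hsub x hx
    · rw [← Bool.not_eq_true]
      intro hall
      have hback : t ⊆ s := by
        intro x hx
        have := List.all_eq_true.mp hall x hx
        simpa using this
      have := subset_length_le ht hback
      omega

theorem any_isProperSubset_eq {sets : List (List Int)} {s : List Int}
    (hs : s.Nodup) (hsets : ∀ t ∈ sets, t.Nodup) :
    (sets.any (fun s2 => isProperSubset s s2)) = badB sets s := by
  by_cases h : BadIn sets s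
  · rw [badB_true h]
    rcases h with ⟨t, ht, hsub, hlt⟩
    exact List.any_eq_true.mpr ⟨t, ht, (isProperSubset_iff hs (hsets t ht)).mpr ⟨hsub, hlt⟩⟩
  · rw [badB_false h]
    rw [List.any_eq_false]
    intro t ht hc
    exact h ⟨t, ht, (isProperSubset_iff hs (hsets t ht)).mp hc⟩

-- a maximal-length witness of an existential over a list
theorem exists_max_length {P : List Int → Prop} {sets : List (List Int)}
    (h : ∃ t ∈ sets, P t) : ∃ t ∈ sets, P t ∧ ∀ u ∈ sets, P u → u.length ≤ t.length := by
  induction sets with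
  | nil => simp at h
  | cons a l ih =>
    by_cases hl : ∃ t ∈ l, P t
    · rcases ih hl with ⟨t, ht, hPt, hmax⟩
      by_cases hPa : P a ∧ t.length < a.length
      · refine ⟨a, by simp, hPa.1, ?_⟩
        intro u hu hPu
        rcases List.mem_cons.mp hu with rfl | hu
        · exact le_rfl
        · exact le_trans (hmax u hu hPu) (le_of_lt hPa.2)
      · refine ⟨t, by simp [ht], hPt, ?_⟩
        intro u hu hPu
        rcases List.mem_cons.mp hu with rfl | hu
        · have : ¬ t.length < u.length := fun hlt => hPa ⟨hPu, hlt⟩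
          omega
        · exact hmax u hu hPu
    · rcases h with ⟨t, ht, hPt⟩
      rcases List.mem_cons.mp ht with rfl | ht'
      · refine ⟨t, by simp, hPt, ?_⟩
        intro u hu hPu
        rcases List.mem_cons.mp hu with rfl | hu
        · exact le_rfl
        · exact absurd ⟨u, hu, hPu⟩ hl
      · exact absurd ⟨t, ht', hPt⟩ hl

-- strengthen a Bad witness to a maximal one, which is itself not Bad
theorem bad_has_maximal_good_witness {sets : List (List Int)} {s : List Int}
    (h : BadIn sets s) :
    ∃ t ∈ sets, (∀ x ∈ s, x ∈ t) ∧ s.length < t.length ∧ ¬ BadIn sets t := by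
  rcases exists_max_length h with ⟨t, ht, ⟨hsub, hlt⟩, hmax⟩
  refine ⟨t, ht, hsub, hlt, ?_⟩
  rintro ⟨u, hu, husub, hult⟩
  have hP : (∀ x ∈ s, x ∈ u) ∧ s.length < u.length :=
    ⟨fun x hx => husub x (hsub x hx), lt_trans hlt hult⟩
  exact absurd (hmax u hu hP) (by omega)

-- ---- the sweep invariant ----

def KeepInv (sets : List (List Int)) (m j : Int) (st : List Bool × List (List Int)) : Prop :=
  st.1.length = sets.length ∧
  (∀ i : Nat, i < sets.length →
    st.1.getD i false =
      (decide (m < ((sets.getD i []).length : Int) ∨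
               (((sets.getD i []).length : Int) = m ∧ (i : Int) < j)) &&
       !(badB sets (sets.getD i [])))) ∧
  (∀ k ∈ st.2, k ∈ sets ∧ ¬ BadIn sets k ∧ m ≤ (k.length : Int)) ∧
  (∀ i : Nat, i < sets.length → ¬ BadIn sets (sets.getD i []) →
    (m < ((sets.getD i []).length : Int) ∨
     (((sets.getD i []).length : Int) = m ∧ (i : Int) < j)) →
    sets.getD i [] ∈ st.2)

theorem sweep_cond_eq {sets : List (List Int)} {m j : Int} {st : List Bool × List (List Int)}
    (hinv : KeepInv sets m j st) {s : List Int} (hlen : (s.length : Int) = m) :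
    (st.2.any (fun k => decide ((s.length : Int) < (k.length : Int)) && isSubset s k))
      = badB sets s := by
  obtain ⟨hlenSt, hkeep, hsound, hcompl⟩ := hinv
  by_cases hb : BadIn sets s
  · rw [badB_true hb]
    rcases bad_has_maximal_good_witness hb with ⟨t, ht, hsub, hlt, hgood⟩
    rcases List.mem_iff_getElem.mp ht with ⟨i, hi, rfl⟩
    have hget : sets.getD i [] = sets[i] := by
      rw [List.getD_eq_getElem?_getD, List.getElem?_eq_getElem hi]
      rfl
    have hmem : sets[i] ∈ st.2 := by
      have := hcompl i hi (by rw [hget]; exact hgood) (by rw [hget]; left; omega)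
      rwa [hget] at this
    refine List.any_eq_true.mpr ⟨sets[i], hmem, ?_⟩
    rw [Bool.and_eq_true]
    refine ⟨by simpa using hlt, ?_⟩
    unfold isSubset
    rw [List.all_eq_true]
    intro x hx
    simpa using hsub x hx
  · rw [badB_false hb]
    rw [List.any_eq_false]
    intro k hk hc
    rcases hsound k hk with ⟨hkmem, _, _⟩
    rw [Bool.and_eq_true] at hc
    rcases hc with ⟨h1, h2⟩
    apply hb
    refine ⟨k, hkmem, ?_, by simpa using h1⟩
    unfold isSubset at h2
    rw [List.all_eq_true] at h2
    intro x hx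
    simpa using h2 x hx

theorem sweep_step {sets : List (List Int)} {m j : Int} {st : List Bool × List (List Int)}
    (h0 : 0 ≤ j) (hj : j < (sets.length : Int)) (hinv : KeepInv sets m j st) :
    KeepInv sets m (j + 1) (sweepBody sets m st j) := by
  have hjn : j.toNat < sets.length := by omega
  have hsval : PySem.List.pyGetD sets j [] = sets.getD j.toNat [] :=
    PySem.List.pyGetD_of_nonneg sets [] h0
  have hsmem : sets.getD j.toNat [] ∈ sets := by
    rw [List.getD_eq_getElem?_getD, List.getElem?_eq_getElem hjn]
    exact List.getElem_mem hjn
  obtain ⟨hlenSt, hkeep, hsound, hcompl⟩ := hinv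
  unfold sweepBody
  rw [hsval]
  by_cases hlen : ((sets.getD j.toNat []).length : Int) = m
  · have hcond := sweep_cond_eq ⟨hlenSt, hkeep, hsound, hcompl⟩ hlen
    by_cases hb : BadIn sets (sets.getD j.toNat [])
    · -- blocked: state unchanged
      rw [hcond, badB_true hb]
      simp only [Bool.not_true, Bool.and_false, Bool.false_eq_true, if_false]
      refine ⟨hlenSt, ?_, hsound, ?_⟩
      · intro i hi
        rw [hkeep i hi]
        by_cases hij : i = j.toNat
        · subst hij
          rw [badB_true hb]
          simp
        · have hij' : (i : Int) ≠ j := by omega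
          congr 1
          rw [decide_eq_decide]
          omega
      · intro i hi hbad hcond'
        apply hcompl i hi hbad
        by_cases hij : i = j.toNat
        · subst hij
          exact absurd hb hbad
        · have hij' : (i : Int) ≠ j := by omega
          omega
    · -- kept: set flag j, append the cluster
      rw [hcond, badB_false hb]
      simp only [hlen, decide_true, Bool.not_false, Bool.and_true, if_true]
      rw [PySem.List.pySetD_of_nonneg st.1 true h0]
      refine ⟨by rw [List.length_set, hlenSt], ?_, ?_, ?_⟩
      · intro i hi
        by_cases hij : i = j.toNat
        · subst hij
          have hv : (st.1.set j.toNat true).getD j.toNat false = true := by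
            rw [List.getD_eq_getElem?_getD, List.getElem?_set]
            simp [hlenSt, hjn]
          rw [hv, badB_false hb]
          have hd : decide (m < ((sets.getD j.toNat []).length : Int) ∨
              (((sets.getD j.toNat []).length : Int) = m ∧ ((j.toNat : Nat) : Int) < j + 1)) = true := by
            rw [decide_eq_true_eq]
            exact Or.inr ⟨hlen, by omega⟩
          rw [hd]
          rfl
        · have hv : (st.1.set j.toNat true).getD i false = st.1.getD i false := by
            rw [List.getD_eq_getElem?_getD, List.getElem?_set,
              if_neg (fun hc => hij hc.symm), ← List.getD_eq_getElem?_getD]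
          rw [hv, hkeep i hi]
          have hij' : (i : Int) ≠ j := by omega
          congr 1
          rw [decide_eq_decide]
          omega
      · intro k hk
        rcases List.mem_append.mp hk with hk | hk
        · exact hsound k hk
        · rcases List.mem_singleton.mp hk with rfl
          exact ⟨hsmem, hb, by omega⟩
      · intro i hi hbad hcond'
        by_cases hij : i = j.toNat
        · subst hij
          simp
        · have hij' : (i : Int) ≠ j := by omega
          refine List.mem_append.mpr (Or.inl ?_)
          exact hcompl i hi hbad (by omega)
  · -- wrong size class: condition false, state unchanged
    rw [if_neg (by
      simp only [Bool.and_eq_true, decide_eq_true_eq]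
      rintro ⟨h1, _⟩
      exact hlen h1)]
    refine ⟨hlenSt, ?_, hsound, ?_⟩
    · intro i hi
      rw [hkeep i hi]
      by_cases hij : i = j.toNat
      · subst hij
        congr 1
        rw [decide_eq_decide]
        constructor <;> rintro (h1 | h1)
        · exact Or.inl h1
        · exact absurd h1.1 hlen
        · exact Or.inl h1
        · exact absurd h1.1 hlen
      · have hij' : (i : Int) ≠ j := by omega
        congr 1
        rw [decide_eq_decide]
        omega
    · intro i hi hbad hcond'
      apply hcompl i hi hbad
      by_cases hij : i = j.toNat
      · subst hij
        rcases hcond' with h1 | h1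
        · exact Or.inl h1
        · exact absurd h1.1 hlen
      · have hij' : (i : Int) ≠ j := by omega
        omega

theorem sweep_inner {sets : List (List Int)} {m : Int} :
    ∀ (c : Nat) (j : Int) (st : List Bool × List (List Int)), 0 ≤ j →
      j + (c : Int) = (sets.length : Int) → KeepInv sets m j st →
      KeepInv sets m (sets.length : Int)
        ((PySem.List.pyRange j (sets.length : Int) 1).foldl (sweepBody sets m) st) := by
  intro c
  induction c with
  | zero =>
    intro j st h0 hc hinv
    have hj : j = (sets.length : Int) := by omega
    subst hj
    rw [PySem.List.pyRange_one_eq_nil (le_refl _)]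
    simpa using hinv
  | succ c ih =>
    intro j st h0 hc hinv
    have hj : j < (sets.length : Int) := by
      have : ((c + 1 : Nat) : Int) = (c : Int) + 1 := by push_cast; ring
      omega
    rw [PySem.List.pyRange_one_cons hj]
    simp only [List.foldl_cons]
    refine ih (j + 1) _ (by omega) (by push_cast at hc ⊢; omega) (sweep_step h0 hj hinv)

theorem keepinv_shift {sets : List (List Int)} {m : Int} {st : List Bool × List (List Int)}
    (h : KeepInv sets m (sets.length : Int) st) : KeepInv sets (m - 1) 0 st := by
  obtain ⟨hlenSt, hkeep, hsound, hcompl⟩ := h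
  refine ⟨hlenSt, ?_, ?_, ?_⟩
  · intro i hi
    rw [hkeep i hi]
    have hi' : (i : Int) < (sets.length : Int) := by exact_mod_cast hi
    congr 1
    rw [decide_eq_decide]
    omega
  · intro k hk
    rcases hsound k hk with ⟨h1, h2, h3⟩
    exact ⟨h1, h2, by omega⟩
  · intro i hi hbad hcond
    have hi' : (i : Int) < (sets.length : Int) := by exact_mod_cast hi
    exact hcompl i hi hbad (by omega)

theorem sweep_outer {sets : List (List Int)} :
    ∀ (kf : Nat) (m : Int), m + 1 = (kf : Int) →
      ∀ st, KeepInv sets m 0 st →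
      KeepInv sets (-1) 0
        ((PySem.List.pyRange m (-1) (-1)).foldl
          (fun st size =>
            (PySem.List.pyRange 0 (sets.length : Int) 1).foldl (sweepBody sets size) st) st) := by
  intro kf
  induction kf with
  | zero =>
    intro m hm st hinv
    have hm' : m = -1 := by omega
    subst hm'
    rw [PySem.List.pyRange_neg_one_eq_nil (le_refl _)]
    simpa using hinv
  | succ kf ih =>
    intro m hm st hinv
    have hm0 : -1 < m := by
      have : ((kf + 1 : Nat) : Int) = (kf : Int) + 1 := by push_cast; ring
      omega
    rw [PySem.List.pyRange_neg_one_cons hm0]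
    simp only [List.foldl_cons]
    refine ih (m - 1) (by push_cast at hm ⊢; omega) _ ?_
    exact keepinv_shift (sweep_inner (sets.length) 0 st (by omega) (by omega) hinv)

-- ---- reading the results back as filters ----

theorem if_flip {α : Type} (b : Bool) (x y : α) :
    (if b = true then x else y) = if (!b) = true then y else x := by
  cases b <;> simp

theorem map_filter_range {α : Type} (xs : List α) (d : α) (q : α → Bool) :
    ((List.range xs.length).filter (fun i => q (xs.getD i d))).map (fun i => xs.getD i d)
      = xs.filter q := by
  induction xs with
  | nil => simp
  | cons a tl ih =>
    show ((List.range (tl.length + 1)).filter _).map _ = _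
    rw [List.range_succ_eq_map, List.filter_cons]
    simp only [List.getD_cons_zero, List.filter_map, Function.comp_def,
      Nat.succ_eq_add_one, List.getD_cons_succ]
    have ih' := ih
    simp only [List.getD_eq_getElem?_getD] at ih'
    by_cases hq : q a <;>
      simp [Function.comp_def, hq, ih']

theorem foldl_keep_filter {sets : List (List Int)} {keepL : List Bool} (q : List Int → Bool)
    (hkeep : ∀ i : Nat, i < sets.length → keepL.getD i false = q (sets.getD i [])) :
    ((PySem.List.pyRange 0 (sets.length : Int) 1).foldl
      (fun out i =>
        if PySem.List.pyGetD keepL i false = true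
        then out ++ [PySem.List.pyGetD sets i []] else out) [])
      = sets.filter q := by
  rw [PySem.List.pyRange_zero_natCast, List.foldl_map]
  rw [PySem.List.foldl_congr_mem (List.range sets.length) _
    (fun out (k : Nat) => if q (sets.getD k []) then out ++ [sets.getD k []] else out) [] ?_]
  · rw [PySem.List.foldl_append_if (fun k => q (sets.getD k [])) (fun k => sets.getD k [])]
    rw [List.nil_append]
    exact map_filter_range sets [] q
  · intro acc k hk
    have hk' : k < sets.length := List.mem_range.mp hk
    rw [PySem.List.pyGetD_natCast, PySem.List.pyGetD_natCast, hkeep k hk']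

theorem nodup_sets (ic : List (List Int)) : ∀ t ∈ ic.map pySet, t.Nodup := by
  intro t ht
  rcases List.mem_map.mp ht with ⟨c, _, rfl⟩
  exact pySet_nodup c

-- A's fold as a filter
theorem identify_cliques_eq_filter (ic : List (List Int)) :
    identify_cliques ic =
      (ic.map pySet).filter (fun s => !(badB (ic.map pySet) s)) := by
  unfold identify_cliques
  have hbody : (fun (cliques : List (List Int)) s1 =>
      if (ic.map pySet).any (fun s2 => isProperSubset s1 s2) = true then cliques
      else cliques ++ [s1]) =
      (fun (cliques : List (List Int)) s1 =>
        if (!(ic.map pySet).any (fun s2 => isProperSubset s1 s2)) = true then cliques ++ [s1]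
        else cliques) := by
    funext acc s1
    rw [if_flip]
  rw [hbody, PySem.List.foldl_append_if
    (fun s1 => !(ic.map pySet).any (fun s2 => isProperSubset s1 s2)) (fun s1 => s1)]
  rw [List.nil_append]
  have hmap : ∀ (l : List (List Int)), l.map (fun s1 => s1) = l := fun l => List.map_id' l
  rw [hmap]
  apply List.filter_congr
  intro s hsmem
  rw [any_isProperSubset_eq (nodup_sets ic s hsmem) (nodup_sets ic)]

-- B's sweep as the same filter
theorem identify_cliques_alt_eq_filter (ic : List (List Int)) :
    identify_cliques_alt ic =
      (ic.map pySet).filter (fun s => !(badB (ic.map pySet) s)) := by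
  unfold identify_cliques_alt
  rw [buildB_eq]
  set sets := ic.map pySet with hsets
  set M : Int := PySem.List.maxD (sets.map (fun s => ((s.length : Int)))) (fun x => x) 0 with hM
  have hMfacts : 0 ≤ M ∧ ∀ s ∈ sets, (s.length : Int) ≤ M := by
    rw [hM]
    unfold PySem.List.maxD
    cases hmx : PySem.List.max? (sets.map (fun s => ((s.length : Int)))) (fun x => x) with
    | none =>
      have : sets.map (fun s => ((s.length : Int))) = [] :=
        (PySem.List.max?_eq_none_iff _ _).mp hmx
      have hnil : sets = [] := List.map_eq_nil_iff.mp this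
      simp [hnil]
    | some v =>
      have hmem := PySem.List.max?_mem hmx
      rcases List.mem_map.mp hmem with ⟨t, _, rfl⟩
      have hmax := PySem.List.max?_isMax hmx
      refine ⟨by simp, ?_⟩
      intro s hs
      have : ((s.length : Int)) ∈ sets.map (fun s => ((s.length : Int))) :=
        List.mem_map.mpr ⟨s, hs, rfl⟩
      simpa using hmax _ this
  have hinit : KeepInv sets M 0 (List.replicate sets.length false, []) := by
    refine ⟨by simp, ?_, by simp, ?_⟩
    · intro i hi
      have hv : (List.replicate sets.length false).getD i false = false := by
        rw [List.getD_eq_getElem?_getD, List.getElem?_replicate]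
        split <;> rfl
      rw [hv]
      symm
      have hd : decide (M < ((sets.getD i []).length : Int) ∨
          (((sets.getD i []).length : Int) = M ∧ (i : Int) < 0)) = false := by
        rw [decide_eq_false_iff_not]
        rintro (h1 | h1)
        · have hmem : sets.getD i [] ∈ sets := by
            rw [List.getD_eq_getElem?_getD, List.getElem?_eq_getElem hi]
            exact List.getElem_mem hi
          have := hMfacts.2 _ hmem
          omega
        · omega
      rw [hd]
      rfl
    · intro i hi hbad hcond
      exfalso
      rcases hcond with h1 | h1
      · have hmem : sets.getD i [] ∈ sets := by
          rw [List.getD_eq_getElem?_getD, List.getElem?_eq_getElem hi]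
          exact List.getElem_mem hi
        have := hMfacts.2 _ hmem
        omega
      · omega
  have hfin := sweep_outer (sets := sets) (M + 1).toNat M (by omega) _ hinit
  obtain ⟨hlenF, hkeepF, _, _⟩ := hfin
  refine foldl_keep_filter (fun s => !(badB sets s)) ?_
  intro i hi
  rw [hkeepF i hi]
  have hpos : (-1 : Int) < ((sets.getD i []).length : Int) := by
    have : (0 : Int) ≤ ((sets.getD i []).length : Int) := by positivity
    omega
  have hd : decide ((-1 : Int) < ((sets.getD i []).length : Int) ∨
      (((sets.getD i []).length : Int) = -1 ∧ (i : Int) < 0)) = true := by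
    rw [decide_eq_true_eq]
    exact Or.inl hpos
  rw [hd, Bool.true_and]

-- ===== VERDICT (by name: the statement is the Claim_ definition above) =====
theorem identify_cliques_spec : Claim_equal_identify_cliques := by
  intro ic _
  unfold Spec_identify_cliques
  rw [identify_cliques_eq_filter, identify_cliques_alt_eq_filter]
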